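-- pv_equiv track=rewrite | github.com/NevolinPetr/Pygame-project | upscale_func.py | upscale
-- ===== SOURCE A (Python) =====
-- def upscale(a, sx, sy):
--     p = [0] * len(a[0]) * sx
--     a2 = []
--     for i in range(len(a) * sy):
--         a2.append(p[:])
--     for i in range(len(a)):
--         for j in range(len(a[0])):
--             for y in range(sy):
--                 for x in range(sx):
--                     a2[i * sy + y][j * sx + x] = a[i][j]
--     return a2
-- ===== SOURCE B (Python) =====
-- def upscale(a, sx, sy):
--     cols = len(a[0])
--     result = []
--     for row in a:
--         newrow = [row[j] for j in range(cols) for _ in range(sx)]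
--         for _ in range(sy):
--             result.append(newrow[:])
--     return result
-- ===== Notes on version B (the rewrite author's own statement) =====
-- stated objective: simpler
-- what changed: B builds each expanded row once with a comprehension and appends sy copies of it per input row, replacing A's pre-allocated zero grid filled cell-by-cell by four nested index loops.
-- outside the precondition, e.g. on upscale([[1], []], 1, 0): A returns [], B raises IndexError
import Mathlib
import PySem

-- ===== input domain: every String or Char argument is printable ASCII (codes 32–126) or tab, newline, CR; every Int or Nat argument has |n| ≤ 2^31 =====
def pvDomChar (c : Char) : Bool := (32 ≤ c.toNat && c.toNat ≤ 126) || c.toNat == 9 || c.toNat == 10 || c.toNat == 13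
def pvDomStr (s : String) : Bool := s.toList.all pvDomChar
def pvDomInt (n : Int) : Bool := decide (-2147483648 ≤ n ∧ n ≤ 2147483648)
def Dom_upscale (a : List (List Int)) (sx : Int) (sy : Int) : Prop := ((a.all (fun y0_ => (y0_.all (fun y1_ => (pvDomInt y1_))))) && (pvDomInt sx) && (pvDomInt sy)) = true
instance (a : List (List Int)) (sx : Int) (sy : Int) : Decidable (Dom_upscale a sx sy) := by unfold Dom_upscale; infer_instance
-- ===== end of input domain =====

-- B builds each expanded row once and appends sy copies of it per input row, replacing A's
-- pre-allocated zero grid filled cell-by-cell by four nested index loops (objective: simpler).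


-- ===== PORT A =====
-- a2[r][k] = v on the nested list: exact for 0 ≤ r < len a2 and 0 ≤ k < len a2[r],
-- which always holds where A's loops perform the assignment.
def pyWrite (g : List (List Int)) (r k : Int) (v : Int) : List (List Int) :=
  PySem.List.pySetD g r (PySem.List.pySetD (PySem.List.pyGetD g r []) k v)

-- 'a[0]' is ported as 'a.headD []': exact under Pre_ (a ≠ []); Python raises IndexError on [].
-- 'a[i][j]' is ported with pyGetD: exact where the loops read it (in range under Pre_).
def upscale (a : List (List Int)) (sx : Int) (sy : Int) : List (List Int) :=
  let p := PySem.List.pyRepeat (PySem.List.pyRepeat [(0 : Int)] ((a.headD []).length : Int)) sx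
  let a2 := (PySem.List.pyRange 0 ((a.length : Int) * sy) 1).foldl (fun g _ => g ++ [p]) []
  (PySem.List.pyRange 0 (a.length : Int) 1).foldl (fun g i =>
    (PySem.List.pyRange 0 ((a.headD []).length : Int) 1).foldl (fun g j =>
      (PySem.List.pyRange 0 sy 1).foldl (fun g y =>
        (PySem.List.pyRange 0 sx 1).foldl (fun g x =>
          pyWrite g (i * sy + y) (j * sx + x)
            (PySem.List.pyGetD (PySem.List.pyGetD a i []) j 0)) g) g) g) a2

-- ===== PORT B =====
-- 'cols = len(a[0])' is ported with headD: exact under Pre_ (a ≠ []);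
-- 'row[j]' is ported with pyGetD: exact where the comprehension evaluates it (in range under Pre_).
def upscale_alt (a : List (List Int)) (sx : Int) (sy : Int) : List (List Int) :=
  let cols := ((a.headD []).length : Int)
  a.foldl (fun res row =>
    let newrow := (PySem.List.pyRange 0 cols 1).flatMap (fun j =>
      (PySem.List.pyRange 0 sx 1).map (fun _ => PySem.List.pyGetD row j 0))
    (PySem.List.pyRange 0 sy 1).foldl (fun res _ => res ++ [newrow]) res) []

-- ===== PRECONDITION & SPEC =====
-- Pre_ excludes: empty a (A raises IndexError on len(a[0])); and, when sx > 0, arrays whose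
-- first row is longer than some other row — there A raises IndexError when sy > 0, and when
-- sy ≤ 0 A returns [] without ever reading the missing cells while B's comprehension raises.
def Pre_upscale (a : List (List Int)) (sx : Int) (sy : Int) : Prop :=
  a ≠ [] ∧ (sx ≤ 0 ∨ ∀ row ∈ a, (a.headD []).length ≤ row.length)
instance (a : List (List Int)) (sx : Int) (sy : Int) : Decidable (Pre_upscale a sx sy) := by
  unfold Pre_upscale; infer_instance
def pvWitness_upscale : List (List Int) × Int × Int := ([[1, 2], [3, 4]], 2, 2)

def Spec_upscale (a : List (List Int)) (sx : Int) (sy : Int) (out : List (List Int)) : Prop := out = upscale_alt a sx sy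
instance (a : List (List Int)) (sx : Int) (sy : Int) (out : List (List Int)) : Decidable (Spec_upscale a sx sy out) := by unfold Spec_upscale; infer_instance

-- ===== CLAIM (what is proved, stated in full; the proofs are below) =====
def Claim_equal_upscale : Prop := ∀ (a : List (List Int)) (sx : Int) (sy : Int), Dom_upscale a sx sy → Pre_upscale a sx sy → Spec_upscale a sx sy (upscale a sx sy)

-- ===== LEMMAS AND PROOFS =====

-- the expanded row B builds for an input row
def expandP (c : Nat) (sx : Int) (row : List Int) : List Int :=
  (PySem.List.pyRange 0 (c : Int) 1).flatMap (fun j =>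
    (PySem.List.pyRange 0 sx 1).map (fun _ => PySem.List.pyGetD row j 0))

theorem alt_go (sx sy : Int) (c : Nat) (l : List (List Int)) : ∀ acc,
    l.foldl (fun res row =>
      (PySem.List.pyRange 0 sy 1).foldl (fun res _ =>
        res ++ [(PySem.List.pyRange 0 (c : Int) 1).flatMap (fun j =>
          (PySem.List.pyRange 0 sx 1).map (fun _ => PySem.List.pyGetD row j 0))]) res) acc
    = acc ++ l.flatMap (fun row => List.replicate sy.toNat (expandP c sx row)) := by
  induction l with
  | nil => simp
  | cons r t ih =>
    intro acc
    rw [List.foldl_cons, PySem.List.foldl_append_singleton_eq_map, ih]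
    simp [expandP, List.map_const', PySem.List.length_pyRange_one]

-- B's result, characterised
theorem alt_eq (a : List (List Int)) (sx sy : Int) :
    upscale_alt a sx sy =
      a.flatMap (fun row => List.replicate sy.toNat (expandP (a.headD []).length sx row)) := by
  unfold upscale_alt
  dsimp only
  rw [alt_go]
  simp

-- one write splits at the target row
theorem pyWrite_split (pre : List (List Int)) (q : List Int) (post : List (List Int)) (k v : Int) :
    pyWrite (pre ++ q :: post) (pre.length : Int) k v = pre ++ (PySem.List.pySetD q k v) :: post := by
  simp [pyWrite, List.getD_eq_getElem?_getD]

-- a fold of writes into one fixed row splits at that row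
theorem foldW_split (L : List Int) (idx : Int → Int) (v : Int)
    (pre : List (List Int)) (q : List Int) (post : List (List Int)) (r : Int)
    (hr : r = (pre.length : Int)) :
    L.foldl (fun g x => pyWrite g r (idx x) v) (pre ++ q :: post)
      = pre ++ (L.foldl (fun q x => PySem.List.pySetD q (idx x) v) q) :: post := by
  subst hr
  induction L generalizing q with
  | nil => simp
  | cons x L ih => simp only [List.foldl_cons, pyWrite_split, ih]

-- the x-loop on one row fills one segment
theorem fillSeg (v : Int) (k : Nat) (m : Nat) (done rest : List Int)
    (hd : done.length = m) (hk : k ≤ rest.length) :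
    (PySem.List.pyRange 0 (k : Int) 1).foldl
        (fun q x => PySem.List.pySetD q ((m : Int) + x) v) (done ++ rest)
      = done ++ List.replicate k v ++ rest.drop k := by
  induction k with
  | zero => simp [PySem.List.pyRange_one_eq_nil]
  | succ k ih =>
    have hk' : k < rest.length := by omega
    have hrange : PySem.List.pyRange 0 ((k+1 : Nat) : Int) 1
        = PySem.List.pyRange 0 (k : Nat) 1 ++ [(k : Int)] := by
      push_cast
      exact PySem.List.pyRange_one_succ_right (by positivity)
    rw [hrange, List.foldl_append, ih (by omega)]
    have hcast : (m : Int) + (k : Int) = ((m + k : Nat) : Int) := by push_cast; ring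
    have hdrop : rest.drop k = rest[k] :: rest.drop (k+1) := List.drop_eq_getElem_cons hk'
    rw [List.foldl_cons, List.foldl_nil, hcast, PySem.List.pySetD_natCast, hdrop]
    have hlen : (done ++ List.replicate k v).length = m + k := by simp [hd]
    rw [← hlen]
    simp only [List.replicate_succ']
    rw [← List.append_assoc]
    simp
    rw [hdrop]
    rfl

-- the x-loop applied to the row at a given position of the grid
def rowFill (b sx v : Int) (q : List Int) : List Int :=
  (PySem.List.pyRange 0 sx 1).foldl (fun q x => PySem.List.pySetD q (b + x) v) q

-- the y-loop transforms a band of rows elementwise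
theorem yfold (sx : Int) (b v r0 : Int) (k : Nat) (pre band post : List (List Int))
    (hk : k ≤ band.length) (hr0 : r0 = (pre.length : Int)) :
    (PySem.List.pyRange 0 (k : Int) 1).foldl (fun g y =>
        (PySem.List.pyRange 0 sx 1).foldl (fun g x => pyWrite g (r0 + y) (b + x) v) g)
      (pre ++ (band ++ post))
    = pre ++ ((band.take k).map (rowFill b sx v) ++ (band.drop k ++ post)) := by
  induction k with
  | zero => simp [PySem.List.pyRange_one_eq_nil]
  | succ k ih =>
    have hk' : k < band.length := by omega
    have hrange : PySem.List.pyRange 0 ((k+1 : Nat) : Int) 1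
        = PySem.List.pyRange 0 (k : Nat) 1 ++ [(k : Int)] := by
      push_cast
      exact PySem.List.pyRange_one_succ_right (by positivity)
    rw [hrange, List.foldl_append, ih (by omega), List.foldl_cons, List.foldl_nil]
    have hdrop : band.drop k = band[k] :: band.drop (k+1) := List.drop_eq_getElem_cons hk'
    have hpre' : r0 + (k : Int) = (((pre ++ (band.take k).map (rowFill b sx v)).length : Nat) : Int) := by
      simp only [List.length_append, List.length_map, List.length_take,
        Nat.min_eq_left (le_of_lt hk'), hr0]
      push_cast; ring
    rw [hdrop]
    have hfw := foldW_split (PySem.List.pyRange 0 sx 1) (fun x => b + x) v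
      (pre ++ (band.take k).map (rowFill b sx v)) band[k] (band.drop (k+1) ++ post) (r0 + (k : Int)) hpre'
    beta_reduce at hfw
    rw [List.append_assoc] at hfw
    refine hfw.trans ?_
    have hmtake : List.take (k+1) (List.map (rowFill b sx v) band)
        = List.take k (List.map (rowFill b sx v) band) ++ [rowFill b sx v band[k]] := by
      rw [List.take_succ]
      simp [List.getElem?_eq_getElem hk']
    simp only [List.map_take] at hmtake ⊢
    rw [hmtake]
    simp [rowFill]

-- the y-loop over the full band
theorem yfold_full (sx sy : Int) (b v r0 : Int) (pre band post : List (List Int))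
    (hsy : 0 < sy) (hband : band.length = sy.toNat) (hr0 : r0 = (pre.length : Int)) :
    (PySem.List.pyRange 0 sy 1).foldl (fun g y =>
        (PySem.List.pyRange 0 sx 1).foldl (fun g x => pyWrite g (r0 + y) (b + x) v) g)
      (pre ++ (band ++ post))
    = pre ++ (band.map (rowFill b sx v) ++ post) := by
  have h1 : sy = ((sy.toNat : Nat) : Int) := (Int.toNat_of_nonneg (le_of_lt hsy)).symm
  rw [h1, yfold sx b v r0 sy.toNat pre band post (le_of_eq hband.symm) hr0, ← hband]
  simp

-- B's expanded row, built j-segment by j-segment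
def partE (t : Nat) (row : List Int) (k : Nat) : List Int :=
  (List.range k).flatMap (fun j => List.replicate t (row.getD j 0))

theorem partE_succ (t : Nat) (row : List Int) (k : Nat) :
    partE t row (k+1) = partE t row k ++ List.replicate t (row.getD k 0) := by
  simp [partE, List.range_succ]

theorem partE_len (t : Nat) (row : List Int) (k : Nat) : (partE t row k).length = k * t := by
  induction k with
  | zero => simp [partE]
  | succ k ih => rw [partE_succ]; simp [ih]; ring

theorem expandP_eq (c : Nat) (sx : Int) (row : List Int) (hsx : 0 < sx) :
    expandP c sx row = partE sx.toNat row c := by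
  simp [expandP, partE, PySem.List.pyRange_zero_natCast, List.flatMap_map,
    List.map_const', PySem.List.length_pyRange_one]

-- one x-fill step turns the partial row into the next partial row
theorem rowStep (sx : Int) (hsx : 0 < sx) (row : List Int) (c k : Nat) (hk : k < c) (v : Int) :
    rowFill ((k : Int) * sx) sx v (partE sx.toNat row k ++ List.replicate ((c - k) * sx.toNat) 0)
      = partE sx.toNat row k ++ List.replicate sx.toNat v
          ++ List.replicate ((c - (k+1)) * sx.toNat) 0 := by
  have ht : sx = ((sx.toNat : Nat) : Int) := (Int.toNat_of_nonneg (le_of_lt hsx)).symm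
  have hb : (k : Int) * sx = ((k * sx.toNat : Nat) : Int) := by
    push_cast [Int.toNat_of_nonneg (le_of_lt hsx)]; ring
  have hle : sx.toNat ≤ ((c - k) * sx.toNat) := by
    calc sx.toNat = 1 * sx.toNat := (one_mul _).symm
      _ ≤ (c - k) * sx.toNat := Nat.mul_le_mul_right _ (by omega)
  rw [rowFill, hb]
  rw [show (PySem.List.pyRange 0 sx 1) = PySem.List.pyRange 0 ((sx.toNat : Nat) : Int) 1 by rw [← ht]]
  rw [fillSeg v sx.toNat (k * sx.toNat) _ _ (partE_len _ _ _)
    (by rw [List.length_replicate]; exact hle)]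
  rw [List.drop_replicate]
  congr 2
  rw [Nat.sub_mul, Nat.sub_mul, Nat.add_mul, one_mul, Nat.sub_sub]

-- the j-loop fills the whole band of rows for one source row
theorem jfold (sx sy : Int) (hsx : 0 < sx) (hsy : 0 < sy) (i : Int)
    (row : List Int) (c : Nat) (hc : c ≤ row.length)
    (pre post : List (List Int)) (hi : i * sy = (pre.length : Int)) (k : Nat) (hk : k ≤ c) :
    (PySem.List.pyRange 0 (k : Int) 1).foldl (fun g j =>
        (PySem.List.pyRange 0 sy 1).foldl (fun g y =>
          (PySem.List.pyRange 0 sx 1).foldl (fun g x =>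
            pyWrite g (i * sy + y) (j * sx + x) (PySem.List.pyGetD row j 0)) g) g)
      (pre ++ (List.replicate sy.toNat (List.replicate (c * sx.toNat) 0) ++ post))
    = pre ++ (List.replicate sy.toNat
        (partE sx.toNat row k ++ List.replicate ((c - k) * sx.toNat) 0) ++ post) := by
  induction k with
  | zero => simp [PySem.List.pyRange_one_eq_nil, partE]
  | succ k ih =>
    have hrange : PySem.List.pyRange 0 ((k+1 : Nat) : Int) 1
        = PySem.List.pyRange 0 (k : Nat) 1 ++ [(k : Int)] := by
      push_cast
      exact PySem.List.pyRange_one_succ_right (by positivity)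
    rw [hrange, List.foldl_append, ih (by omega), List.foldl_cons, List.foldl_nil]
    rw [yfold_full sx sy ((k : Int) * sx) (PySem.List.pyGetD row (k : Int) 0) (i * sy)
      pre _ post hsy (by simp) hi]
    rw [List.map_replicate, PySem.List.pyGetD_natCast,
      rowStep sx hsx row c k (by omega) (row.getD k 0), ← partE_succ]

-- the grid A pre-allocates
theorem p_eq (c : Nat) (sx : Int) :
    PySem.List.pyRepeat (PySem.List.pyRepeat [(0 : Int)] (c : Int)) sx
      = List.replicate (c * sx.toNat) 0 := by
  simp [PySem.List.pyRepeat, List.flatten_replicate_replicate]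
  exact Nat.mul_comm _ _

theorem a2_eq (N : Int) (p : List Int) :
    (PySem.List.pyRange 0 N 1).foldl (fun g _ => g ++ [p]) []
      = List.replicate N.toNat p := by
  rw [PySem.List.foldl_append_singleton_eq_map]
  simp [List.map_const', PySem.List.length_pyRange_one]

-- the i-loop, band by band
theorem ifold (a : List (List Int)) (sx sy : Int) (hsx : 0 < sx) (hsy : 0 < sy) (c : Nat)
    (hrect : ∀ row ∈ a, c ≤ row.length) (m : Nat) (hm : m ≤ a.length) :
    (PySem.List.pyRange 0 (m : Int) 1).foldl (fun g i =>
      (PySem.List.pyRange 0 (c : Int) 1).foldl (fun g j =>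
        (PySem.List.pyRange 0 sy 1).foldl (fun g y =>
          (PySem.List.pyRange 0 sx 1).foldl (fun g x =>
            pyWrite g (i * sy + y) (j * sx + x)
              (PySem.List.pyGetD (PySem.List.pyGetD a i []) j 0)) g) g) g)
      (List.replicate (a.length * sy.toNat) (List.replicate (c * sx.toNat) 0))
    = (a.take m).flatMap (fun row => List.replicate sy.toNat (partE sx.toNat row c))
        ++ List.replicate ((a.length - m) * sy.toNat) (List.replicate (c * sx.toNat) 0) := by
  induction m with
  | zero => simp [PySem.List.pyRange_one_eq_nil]
  | succ m ih =>
    have hm' : m < a.length := by omega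
    have hrange : PySem.List.pyRange 0 ((m+1 : Nat) : Int) 1
        = PySem.List.pyRange 0 (m : Nat) 1 ++ [(m : Int)] := by
      push_cast
      exact PySem.List.pyRange_one_succ_right (by positivity)
    rw [hrange, List.foldl_append, ih (by omega), List.foldl_cons, List.foldl_nil]
    have hget : PySem.List.pyGetD a ((m : Nat) : Int) [] = a.getD m [] :=
      PySem.List.pyGetD_natCast a m []
    simp only [hget]
    have hsplit : List.replicate ((a.length - m) * sy.toNat) (List.replicate (c * sx.toNat) (0:Int))
        = List.replicate sy.toNat (List.replicate (c * sx.toNat) 0)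
          ++ List.replicate ((a.length - (m+1)) * sy.toNat) (List.replicate (c * sx.toNat) 0) := by
      rw [← List.replicate_add]
      congr 1
      have hle : (m+1) * sy.toNat ≤ a.length * sy.toNat := Nat.mul_le_mul_right _ (by omega)
      rw [Nat.add_mul, one_mul] at hle
      rw [Nat.sub_mul, Nat.sub_mul, Nat.add_mul, one_mul]
      generalize m * sy.toNat = B at hle ⊢
      generalize a.length * sy.toNat = A at hle ⊢
      omega
    rw [hsplit, ← List.append_assoc]
    have hlen : ((m : Int)) * sy = ((((a.take m).flatMap
        (fun row => List.replicate sy.toNat (partE sx.toNat row c))).length : Nat) : Int) := by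
      have : ((a.take m).flatMap (fun row => List.replicate sy.toNat (partE sx.toNat row c))).length
          = m * sy.toNat := by
        rw [List.length_flatMap]
        have hmc : (List.map (fun r => (List.replicate sy.toNat (partE sx.toNat r c)).length)
              (List.take m a))
            = List.map (fun _ => sy.toNat) (List.take m a) :=
          List.map_congr_left (fun r _ => by simp)
        rw [hmc, List.map_const', List.sum_replicate, smul_eq_mul, List.length_take,
          Nat.min_eq_left (by omega)]
      rw [this]
      push_cast [Int.toNat_of_nonneg (le_of_lt hsy)]
      ring
    rw [List.append_assoc, jfold sx sy hsx hsy (m : Int) (a.getD m []) c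
      (hrect _ (by rw [List.getD_eq_getElem _ _ hm']; exact List.getElem_mem hm')) _ _ hlen c le_rfl]
    have htake : a.take (m+1) = a.take m ++ [a.getD m []] := by
      rw [List.take_succ, List.getElem?_eq_getElem hm', List.getD_eq_getElem _ _ hm']
      rfl
    rw [htake]
    simp

-- ===== VERDICT (by name: the statement is the Claim_ definition above) =====
theorem upscale_spec : Claim_equal_upscale := by
  unfold Claim_equal_upscale
  intro a sx sy _ hpre
  unfold Spec_upscale
  rcases hpre with ⟨hne, hrect⟩
  rw [alt_eq]
  unfold upscale
  dsimp only
  by_cases hsy : sy ≤ 0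
  · -- sy ≤ 0: A builds no rows and writes nothing; B appends no copies
    have h1 : PySem.List.pyRange 0 sy 1 = [] := PySem.List.pyRange_one_eq_nil (by omega)
    have h2 : PySem.List.pyRange 0 ((a.length : Int) * sy) 1 = [] :=
      PySem.List.pyRange_one_eq_nil (mul_nonpos_of_nonneg_of_nonpos (by positivity) hsy)
    rw [h2]
    simp only [List.foldl_nil, h1, PySem.List.foldl_ignore, Int.toNat_of_nonpos hsy,
      List.replicate_zero]
    symm
    simp [List.flatMap_eq_nil_iff]
  · push_neg at hsy
    have hN : ((a.length : Int) * sy).toNat = a.length * sy.toNat := by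
      rw [show ((a.length : Int) * sy) = ((a.length * sy.toNat : Nat) : Int) by
        push_cast [Int.toNat_of_nonneg (le_of_lt hsy)]; ring, Int.toNat_natCast]
    by_cases hsx : sx ≤ 0
    · -- sx ≤ 0: every row of A's grid and every row B builds is []
      have h1 : PySem.List.pyRange 0 sx 1 = [] := PySem.List.pyRange_one_eq_nil (by omega)
      have hp : PySem.List.pyRepeat (PySem.List.pyRepeat [(0:Int)]
          ((a.headD []).length : Int)) sx = [] := by
        rw [p_eq]; simp [Int.toNat_of_nonpos hsx]
      rw [a2_eq, hp]
      simp only [h1, List.foldl_nil, PySem.List.foldl_ignore]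
      have hflat : ∀ (l : List (List Int)),
          l.flatMap (fun _ => List.replicate sy.toNat ([] : List Int))
            = List.replicate (l.length * sy.toNat) [] := by
        intro l
        induction l with
        | nil => simp
        | cons r t ih =>
          rw [List.flatMap_cons, ih, List.replicate_append_replicate]
          congr 1
          rw [List.length_cons, Nat.add_mul, one_mul, Nat.add_comm]
      simp only [expandP, h1, List.map_nil]
      have hnil : ∀ (L : List Int), (L.flatMap (fun _ : Int => ([] : List Int))) = [] :=
        fun L => by simp
      simp only [hnil, hflat, hN]
    · -- main case: 0 < sx, 0 < sy, first row no longer than any row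
      push_neg at hsx
      rcases hrect with h | hrect
      · omega
      rw [a2_eq, p_eq]
      rw [hN, ifold a sx sy hsx hsy (a.headD []).length hrect a.length le_rfl]
      simp only [List.take_length, Nat.sub_self, Nat.zero_mul, List.replicate_zero,
        List.append_nil]
      have he : ∀ row, expandP (a.headD []).length sx row
          = partE sx.toNat row (a.headD []).length := fun row => expandP_eq _ _ _ hsx
      simp only [he]
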